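-- pv_equiv track=rewrite | github.com/DouglasRaillard/BrownBat | brownbat/core.py | strip_starting_blank_lines
-- ===== SOURCE A (Python) =====
-- def strip_starting_blank_lines(snippet):
--     """Strip blank lines at the beginning of a multiline string."""
--
--     last_new_line_pos = 0
--     for position, char in enumerate(snippet):
--         if char=='\n':
--             last_new_line_pos = position
--         elif char!='\t' and char!=' ' and char!='\v':
--             break
--     # Only keep one new line at the beginning, to avoid multiple blank lines
--     return snippet[last_new_line_pos:]
-- ===== SOURCE B (Python) =====
-- import re
--
-- def strip_starting_blank_lines(snippet):
--     """Strip blank lines at the beginning of a multiline string."""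
--     prefix = re.match(r'[\n\t \v]*', snippet).group(0)
--     idx = prefix.rfind('\n')
--     return snippet[idx if idx >= 0 else 0:]
-- ===== Notes on version B (the rewrite author's own statement) =====
-- stated objective: simpler
-- what changed: B replaces A's fused forward loop with position/last-newline bookkeeping by a two-step decomposition: grab the maximal leading blank run with a regex, then rfind the last newline in that prefix and slice there.
import Mathlib
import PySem

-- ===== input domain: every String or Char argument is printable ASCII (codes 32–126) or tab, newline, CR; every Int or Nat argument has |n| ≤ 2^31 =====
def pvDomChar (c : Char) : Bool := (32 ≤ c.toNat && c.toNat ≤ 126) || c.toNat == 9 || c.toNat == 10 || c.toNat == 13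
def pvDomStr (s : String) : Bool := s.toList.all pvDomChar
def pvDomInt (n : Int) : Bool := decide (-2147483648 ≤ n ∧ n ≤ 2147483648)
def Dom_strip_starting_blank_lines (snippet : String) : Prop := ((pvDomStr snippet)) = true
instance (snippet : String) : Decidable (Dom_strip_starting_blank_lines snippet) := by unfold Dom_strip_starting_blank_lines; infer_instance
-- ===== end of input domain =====

-- ===== PORT A =====
-- B changes: regex-prefix + rfind decomposition instead of A's fused forward scan; objective: simpler.
-- Loop of A: tracks the position of the last '\n' seen in the leading blank run, breaks at the first non-blank char.
def pvLoopA : List Char → Nat → Nat → Nat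
  | [], _, last => last
  | c :: rest, pos, last =>
    if c = '\n' then pvLoopA rest (pos + 1) pos
    else if c ≠ '\t' ∧ c ≠ ' ' ∧ c ≠ '\x0b' then last
    else pvLoopA rest (pos + 1) last

-- snippet[last:] with 0 ≤ last ≤ len is exactly List.drop (exact here: the index is a Nat within range)
def strip_starting_blank_lines (snippet : String) : String :=
  String.mk (snippet.toList.drop (pvLoopA snippet.toList 0 0))

-- ===== PORT B =====
def pvBlank (c : Char) : Bool := c = '\n' || c = '\t' || c = ' ' || c = '\x0b'

-- port of str.rfind('\n') (library call in Source B): index of the last '\n', none if absent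
def pvRfindNl : List Char → Option Nat
  | [] => none
  | c :: rest =>
    match pvRfindNl rest with
    | some j => some (j + 1)
    | none => if c = '\n' then some 0 else none

def strip_starting_blank_lines_alt (snippet : String) : String :=
  let pre := snippet.toList.takeWhile pvBlank   -- re.match(r'[\n\t \v]*', snippet).group(0)
  let idx := match pvRfindNl pre with | some j => j | none => 0   -- idx if idx >= 0 else 0
  String.mk (snippet.toList.drop idx)

-- ===== PRECONDITION & SPEC =====
def Spec_strip_starting_blank_lines (snippet : String) (out : String) : Prop := out = strip_starting_blank_lines_alt snippet
instance (snippet : String) (out : String) : Decidable (Spec_strip_starting_blank_lines snippet out) := by unfold Spec_strip_starting_blank_lines; infer_instance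

-- ===== CLAIM (what is proved, stated in full; the proofs are below) =====
def Claim_equal_strip_starting_blank_lines : Prop := ∀ (snippet : String), Dom_strip_starting_blank_lines snippet → Spec_strip_starting_blank_lines snippet (strip_starting_blank_lines snippet)

-- ===== LEMMAS AND PROOFS =====
theorem pvLoopA_eq (cs : List Char) : ∀ (pos last : Nat),
    pvLoopA cs pos last =
      match pvRfindNl (cs.takeWhile pvBlank) with
      | some j => pos + j
      | none => last := by
  induction cs with
  | nil => intro pos last; simp [pvLoopA, List.takeWhile, pvRfindNl]
  | cons c rest ih =>
    intro pos last
    by_cases hn : c = '\n'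
    · subst hn
      simp only [pvLoopA, List.takeWhile, pvBlank]
      simp only [decide_true, Bool.true_or, if_pos, ih]
      cases h : pvRfindNl (rest.takeWhile pvBlank) with
      | none => simp [pvRfindNl, h]
      | some j => simp only [pvRfindNl, h]; rw [Nat.add_assoc, Nat.add_comm 1 j]
    · by_cases hb : c = '\t' ∨ c = ' ' ∨ c = '\x0b'
      · have hbl : pvBlank c = true := by
          simp [pvBlank]; rcases hb with h|h|h <;> simp [h]
        simp only [pvLoopA, if_neg hn]
        rw [if_neg (by tauto)]
        simp only [List.takeWhile, hbl, ih]
        cases h : pvRfindNl (rest.takeWhile pvBlank) with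
        | none => simp [pvRfindNl, h, hn]
        | some j => simp only [pvRfindNl, h]; rw [Nat.add_assoc, Nat.add_comm 1 j]
      · have hbl : pvBlank c = false := by
          simp [pvBlank, hn]; tauto
        simp only [pvLoopA, if_neg hn]
        rw [if_pos (by tauto)]
        simp [List.takeWhile, hbl, pvRfindNl]

-- ===== VERDICT (by name: the statement is the Claim_ definition above) =====
theorem strip_starting_blank_lines_spec : Claim_equal_strip_starting_blank_lines := by
  intro snippet _
  unfold Spec_strip_starting_blank_lines strip_starting_blank_lines strip_starting_blank_lines_alt
  rw [pvLoopA_eq]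
  cases h : pvRfindNl (snippet.toList.takeWhile pvBlank) <;> simp [h]
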